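-- pv_equiv track=rewrite | github.com/AkshayGuptaK/bridge | Bridge.py | determineLargestElementLargerThan
-- ===== SOURCE A (Python) =====
-- def determineLargestElementLargerThan(list, minimum):
-- 	highestvalue = 0
-- 	indexofhighestvalue = -1
-- 	index = 0
-- 	for number in list:
-- 		if number > highestvalue and number >= minimum:
-- 			highestvalue = number
-- 			indexofhighestvalue = index
-- 		index += 1
-- 	return indexofhighestvalue
-- ===== SOURCE B (Python) =====
-- def determineLargestElementLargerThan(list, minimum):
--     candidates = [n for n in list if n >= minimum]
--     if not candidates:
--         return -1
--     return list.index(max(candidates))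
-- ===== Notes on version B (the rewrite author's own statement) =====
-- stated objective: simpler
-- what changed: Replaces the hand-maintained running-max/index/counter state machine with a two-pass decomposition: filter the candidates >= minimum, take their max, then list.index for its first position.
-- intended difference: On lists whose elements are all <= 0 but contain some element >= minimum, A returns -1 (its running max is initialized to 0, so non-positive elements can never be selected even when minimum <= 0), while B returns the index of the largest element >= minimum, which is what the function's name promises. — e.g. on determineLargestElementLargerThan([-3, -1, -2], -2): A returns -1, B returns 1
import Mathlib
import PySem

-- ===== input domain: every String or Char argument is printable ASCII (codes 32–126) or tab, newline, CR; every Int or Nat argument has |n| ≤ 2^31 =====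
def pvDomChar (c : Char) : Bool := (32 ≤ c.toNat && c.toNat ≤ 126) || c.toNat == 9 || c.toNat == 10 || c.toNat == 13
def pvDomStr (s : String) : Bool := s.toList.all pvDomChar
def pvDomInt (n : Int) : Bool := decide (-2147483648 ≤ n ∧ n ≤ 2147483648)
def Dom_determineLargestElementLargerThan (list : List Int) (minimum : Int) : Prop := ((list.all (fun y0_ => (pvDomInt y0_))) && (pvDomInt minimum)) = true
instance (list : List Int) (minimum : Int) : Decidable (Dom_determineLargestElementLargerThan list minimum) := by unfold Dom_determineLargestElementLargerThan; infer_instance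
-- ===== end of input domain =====

-- B replaces A's running-max/index/counter loop with a two-pass decomposition (filter candidates, max, then first index); simpler, same cost; B returns the intended index where A's 0-initialized running max wrongly ignores non-positive elements (see D_).


-- ===== PORT A =====
-- A's for-loop with its three mutable variables (highestvalue, indexofhighestvalue, index)
def detLoop (minimum : Int) (l : List Int) (hv ihv idx : Int) : Int :=
  match l with
  | [] => ihv
  | n :: rest =>
      if n > hv ∧ n ≥ minimum then detLoop minimum rest n idx (idx + 1)
      else detLoop minimum rest hv ihv (idx + 1)

def determineLargestElementLargerThan (list : List Int) (minimum : Int) : Int :=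
  detLoop minimum list 0 (-1) 0

-- ===== PORT B =====
def determineLargestElementLargerThan_alt (list : List Int) (minimum : Int) : Int :=
  let candidates := list.filter (fun n => decide (n ≥ minimum))
  if candidates.isEmpty then -1
  else
    match PySem.List.max? candidates (fun x => x) with
    | some best =>
        match PySem.List.index? list best with
        | some k => (k : Int)
        | none => -1   -- unreachable totalization guard: best is a member of list
    | none => -1       -- unreachable: candidates is nonempty here

-- ===== PRECONDITION & SPEC =====
-- On lists whose elements are all ≤ 0 but contain some element ≥ minimum, A returns -1 (its
-- running max starts at 0, so non-positive elements are never selected even when minimum ≤ 0),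
-- while B returns the index of the largest element ≥ minimum, which is the intended value.
def D_determineLargestElementLargerThan (list : List Int) (minimum : Int) : Prop :=
  (∃ n ∈ list, minimum ≤ n) ∧ ∀ n ∈ list, n ≤ 0
instance (list : List Int) (minimum : Int) : Decidable (D_determineLargestElementLargerThan list minimum) := by unfold D_determineLargestElementLargerThan; infer_instance

def Spec_determineLargestElementLargerThan (list : List Int) (minimum : Int) (out : Int) : Prop := ¬ D_determineLargestElementLargerThan list minimum → out = determineLargestElementLargerThan_alt list minimum
instance (list : List Int) (minimum : Int) (out : Int) : Decidable (Spec_determineLargestElementLargerThan list minimum out) := by unfold Spec_determineLargestElementLargerThan; infer_instance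

def pvDiffWitness_determineLargestElementLargerThan : List Int × Int := ([-3, -1, -2], -2)
def pvDiffWitnessOut_determineLargestElementLargerThan : Int × Int := (-1, 1)

-- ===== CLAIM (what is proved, stated in full; the proofs are below) =====
def Claim_unchanged_determineLargestElementLargerThan : Prop := ∀ (list : List Int) (minimum : Int), Dom_determineLargestElementLargerThan list minimum → Spec_determineLargestElementLargerThan list minimum (determineLargestElementLargerThan list minimum)
def Claim_changed_determineLargestElementLargerThan : Prop := Dom_determineLargestElementLargerThan (pvDiffWitness_determineLargestElementLargerThan.1) (pvDiffWitness_determineLargestElementLargerThan.2) ∧ D_determineLargestElementLargerThan (pvDiffWitness_determineLargestElementLargerThan.1) (pvDiffWitness_determineLargestElementLargerThan.2) ∧ determineLargestElementLargerThan (pvDiffWitness_determineLargestElementLargerThan.1) (pvDiffWitness_determineLargestElementLargerThan.2) = pvDiffWitnessOut_determineLargestElementLargerThan.1 ∧ determineLargestElementLargerThan_alt (pvDiffWitness_determineLargestElementLargerThan.1) (pvDiffWitness_determineLargestElementLargerThan.2) = pvDiffWitnessOut_determineLargestElementLargerThan.2 ∧ pvDiffWitnessOut_determineLargestElementLargerThan.1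 ≠ pvDiffWitnessOut_determineLargestElementLargerThan.2
def Claim_exact_determineLargestElementLargerThan : Prop := ∀ (list : List Int) (minimum : Int), Dom_determineLargestElementLargerThan list minimum → D_determineLargestElementLargerThan list minimum → determineLargestElementLargerThan list minimum ≠ determineLargestElementLargerThan_alt list minimum

-- ===== LEMMAS AND PROOFS =====

-- idxOf? of a member is some idxOf
theorem idxOf?_eq_some_of_mem (l : List Int) (m : Int) (h : m ∈ l) :
    List.idxOf? m l = some (List.idxOf m l) := by
  induction l with
  | nil => simp at h
  | cons a t ih =>
    by_cases hna : a = m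
    · subst hna; simp [List.idxOf?_cons, List.idxOf_cons_self]
    · simp [List.idxOf?_cons, beq_iff_eq, hna,
        ih (by rcases List.mem_cons.mp h with h | h; exact absurd h.symm hna; exact h)]

-- max? with the identity key is characterised by membership + being an upper bound
theorem max?_id_iff (c : List Int) (m : Int) :
    PySem.List.max? c (fun x => x) = some m ↔ m ∈ c ∧ ∀ y ∈ c, y ≤ m := by
  constructor
  · intro h
    exact ⟨PySem.List.max?_mem h, fun y hy => PySem.List.max?_isMax h y hy⟩
  · rintro ⟨hm, hub⟩
    cases hc : PySem.List.max? c (fun x => x) with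
    | none =>
        rw [PySem.List.max?_eq_none_iff] at hc
        simp [hc] at hm
    | some m' =>
        have hm' : m' ∈ c := PySem.List.max?_mem hc
        have h1 : m ≤ m' := PySem.List.max?_isMax hc m hm
        have h2 : m' ≤ m := hub m' hm'
        have : m' = m := le_antisymm h2 h1
        rw [this]

-- characterisation of A's loop from an arbitrary state
theorem detLoop_eq (minimum : Int) (l : List Int) (hv ihv idx : Int) :
    detLoop minimum l hv ihv idx =
      match PySem.List.max? (l.filter (fun n => decide (n > hv) && decide (n ≥ minimum))) (fun x => x) with
      | none => ihv
      | some m => idx + (l.idxOf m : Int) := by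
  induction l generalizing hv ihv idx with
  | nil => simp [detLoop, PySem.List.max?]
  | cons n rest ih =>
    by_cases hc : n > hv ∧ n ≥ minimum
    · rw [show detLoop minimum (n :: rest) hv ihv idx = detLoop minimum rest n idx (idx + 1) by
        simp [detLoop, hc]]
      rw [ih]
      have hfil : (n :: rest).filter (fun x => decide (x > hv) && decide (x ≥ minimum))
          = n :: rest.filter (fun x => decide (x > hv) && decide (x ≥ minimum)) := by
        simp [hc.1, hc.2]
      rw [hfil]
      cases h2 : PySem.List.max? (rest.filter (fun x => decide (x > n) && decide (x ≥ minimum))) (fun x => x) with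
      | none =>
          have hnone : ∀ y ∈ rest, ¬(y > n ∧ y ≥ minimum) := by
            intro y hy hvy
            rw [PySem.List.max?_eq_none_iff, List.filter_eq_nil_iff] at h2
            exact absurd (by simp [hvy.1, hvy.2]) (h2 y hy)
          have hmax : PySem.List.max? (n :: rest.filter (fun x => decide (x > hv) && decide (x ≥ minimum))) (fun x => x) = some n := by
            rw [max?_id_iff]
            refine ⟨by simp, ?_⟩
            intro y hy
            rcases List.mem_cons.mp hy with h | h
            · omega
            · have := List.of_mem_filter h
              have hym := List.mem_of_mem_filter h
              simp at this
              by_contra hlt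
              exact hnone y hym ⟨by omega, this.2⟩
          rw [hmax]
          simp [List.idxOf_cons_self]
      | some m =>
          have hm := (max?_id_iff _ _).mp h2
          have hmf := List.of_mem_filter hm.1
          have hmem : m ∈ rest := List.mem_of_mem_filter hm.1
          simp at hmf
          have hmax : PySem.List.max? (n :: rest.filter (fun x => decide (x > hv) && decide (x ≥ minimum))) (fun x => x) = some m := by
            rw [max?_id_iff]
            constructor
            · exact List.mem_cons_of_mem _ (List.mem_filter.mpr ⟨hmem, by simp; omega⟩)
            · intro y hy
              rcases List.mem_cons.mp hy with h | h
              · omega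
              · have hyp := List.of_mem_filter h
                have hym := List.mem_of_mem_filter h
                simp at hyp
                by_cases hyn : y > n
                · exact hm.2 y (List.mem_filter.mpr ⟨hym, by simp; omega⟩)
                · omega
          rw [hmax]
          show idx + 1 + (List.idxOf m rest : Int) = idx + (List.idxOf m (n :: rest) : Int)
          rw [List.idxOf_cons_ne _ (by omega : n ≠ m)]
          push_cast
          omega
    · rw [show detLoop minimum (n :: rest) hv ihv idx = detLoop minimum rest hv ihv (idx + 1) by
        simp [detLoop, hc]]
      rw [ih]
      have hfil : (n :: rest).filter (fun x => decide (x > hv) && decide (x ≥ minimum))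
          = rest.filter (fun x => decide (x > hv) && decide (x ≥ minimum)) := by
        rw [List.filter_cons]
        simp only [Bool.and_eq_true, decide_eq_true_eq]
        rw [if_neg (by tauto)]
      rw [hfil]
      cases h2 : PySem.List.max? (rest.filter (fun x => decide (x > hv) && decide (x ≥ minimum))) (fun x => x) with
      | none => rfl
      | some m =>
          have hm := (max?_id_iff _ _).mp h2
          have hmf := List.of_mem_filter hm.1
          simp at hmf
          have hne : n ≠ m := by
            intro h; exact hc (h ▸ ⟨hmf.1, hmf.2⟩)
          show idx + 1 + (List.idxOf m rest : Int) = idx + (List.idxOf m (n :: rest) : Int)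
          rw [List.idxOf_cons_ne _ hne]
          push_cast
          omega

-- ===== VERDICT (by name: the statement is the Claim_ definition above) =====
theorem determineLargestElementLargerThan_spec : Claim_unchanged_determineLargestElementLargerThan := by
  unfold Claim_unchanged_determineLargestElementLargerThan
  intro list minimum _ hD
  unfold determineLargestElementLargerThan determineLargestElementLargerThan_alt
  rw [detLoop_eq]
  by_cases hF : list.filter (fun n => decide (n ≥ minimum)) = []
  · -- no candidate at all: both sides return -1
    have hF0 : list.filter (fun n => decide (n > 0) && decide (n ≥ minimum)) = [] := by
      rw [List.filter_eq_nil_iff] at hF ⊢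
      intro a ha
      simp only [Bool.and_eq_true, decide_eq_true_eq, not_and]
      intro _; have := hF a ha; simp at this; omega
    rw [hF0]
    simp [PySem.List.max?, hF]
  · -- some candidate exists
    have hFne : ¬ (List.filter (fun n => decide (n ≥ minimum)) list).isEmpty := by
      simp [List.isEmpty_iff, hF]
    cases hM : PySem.List.max? (list.filter (fun n => decide (n ≥ minimum))) (fun x => x) with
    | none => rw [PySem.List.max?_eq_none_iff] at hM; exact absurd hM hF
    | some M =>
      have hm := (max?_id_iff _ _).mp hM
      have hMlist : M ∈ list := List.mem_of_mem_filter hm.1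
      have hMmin : minimum ≤ M := by have := List.of_mem_filter hm.1; simpa using this
      -- ¬D and existence of a candidate give a positive element, hence 0 < M
      have hpos : 0 < M := by
        unfold D_determineLargestElementLargerThan at hD
        simp only [not_and, not_forall] at hD
        obtain ⟨p, hp, hppos⟩ := hD ⟨M, hMlist, hMmin⟩
        simp only [not_le] at hppos
        by_cases hmin : 0 < minimum
        · omega
        · have : p ∈ list.filter (fun n => decide (n ≥ minimum)) :=
            List.mem_filter.mpr ⟨hp, by simp; omega⟩
          have := hm.2 p this
          omega
      have hM0 : PySem.List.max? (list.filter (fun n => decide (n > 0) && decide (n ≥ minimum))) (fun x => x) = some M := by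
        rw [max?_id_iff]
        constructor
        · exact List.mem_filter.mpr ⟨hMlist, by simp; omega⟩
        · intro y hy
          have hyl := List.mem_of_mem_filter hy
          have hyp := List.of_mem_filter hy
          simp at hyp
          exact hm.2 y (List.mem_filter.mpr ⟨hyl, by simp; omega⟩)
      rw [hM0]
      simp only [hFne, hM]
      rw [PySem.List.index?_eq_idxOf?, idxOf?_eq_some_of_mem list M hMlist]
      show (0 : Int) + (List.idxOf M list : Int) = (List.idxOf M list : Int)
      omega

theorem determineLargestElementLargerThan_changed : Claim_changed_determineLargestElementLargerThan := by
  unfold Claim_changed_determineLargestElementLargerThan; decide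

theorem determineLargestElementLargerThan_tight : Claim_exact_determineLargestElementLargerThan := by
  unfold Claim_exact_determineLargestElementLargerThan
  intro list minimum _ hD
  unfold D_determineLargestElementLargerThan at hD
  obtain ⟨⟨c, hc, hcmin⟩, hall⟩ := hD
  unfold determineLargestElementLargerThan determineLargestElementLargerThan_alt
  -- A returns -1: no element is > 0
  rw [detLoop_eq]
  have hF0 : list.filter (fun n => decide (n > 0) && decide (n ≥ minimum)) = [] := by
    rw [List.filter_eq_nil_iff]
    intro a ha
    simp only [Bool.and_eq_true, decide_eq_true_eq, not_and]
    intro hpos; have := hall a ha; omega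
  rw [hF0]
  -- B returns a nonnegative index
  have hFne : ¬ (List.filter (fun n => decide (n ≥ minimum)) list).isEmpty := by
    simp only [List.isEmpty_iff]
    intro h
    rw [List.eq_nil_iff_forall_not_mem] at h
    exact h c (List.mem_filter.mpr ⟨hc, by simpa using hcmin⟩)
  cases hM : PySem.List.max? (list.filter (fun n => decide (n ≥ minimum))) (fun x => x) with
  | none =>
      rw [PySem.List.max?_eq_none_iff] at hM
      simp [hM] at hFne
  | some M =>
      have hMlist : M ∈ list := List.mem_of_mem_filter ((max?_id_iff _ _).mp hM).1
      simp only [hFne, hM]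
      rw [PySem.List.index?_eq_idxOf?, idxOf?_eq_some_of_mem list M hMlist]
      show ¬ (match PySem.List.max? ([] : List Int) (fun x => x) with
        | none => (-1 : Int) | some m => 0 + (list.idxOf m : Int)) = (List.idxOf M list : Int)
      simp [PySem.List.max?]
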